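-- pv_equiv track=rewrite | github.com/JoaoVLima/AulasAPI | utils/formating.py | format_mask
-- ===== SOURCE A (Python) =====
-- def format_mask(number: int or str,
--                 mask: str = None,
--                 mask_char='_'
--                 ):
--     """
--     Formats a number with zfill and a pre-defined mask (e.g., CPF) or the one passed (e.g., __/____).
--
--     :param number: int or str, e.g., 123456 or '123456'
--     :param mask: str, e.g., '___/____' or 'cpf'
--     :param mask_char: str, default '_', the character to be replaced with the number
--     :return: str, formatted number, e.g., '012/3456'
--     """
--     masks = {
--         'cpf': '___.___.___-__',
--         'rg': '__.___.___-__',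
--         'cnpj': '__.___.___/____-__',
--         'zip': '_____-___',
--     }
--     try:
--         if number and mask:
--             mask = masks.get(mask) or mask
--             size = mask.count(mask_char)
--             number = str(number).zfill(size)
--
--             for digit in number:
--                 mask = mask.replace(mask_char, digit, 1)
--
--             return mask
--         else:
--             return number
--     except Exception:
--         return number
-- ===== SOURCE B (Python) =====
-- def format_mask(number: int or str,
--                 mask: str = None,
--                 mask_char='_'
--                 ):
--     """Same task as A, but built by splitting the mask at the placeholder and zipping the
--     zero-filled digits between the pieces, instead of repeated single-occurrence replace."""
--     masks = {
--         'cpf': '___.___.___-__',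
--         'rg': '__.___.___-__',
--         'cnpj': '__.___.___/____-__',
--         'zip': '_____-___',
--     }
--     try:
--         if number and mask:
--             mask = masks.get(mask) or mask
--             parts = mask.split(mask_char)
--             digits = iter(str(number).zfill(len(parts) - 1))
--             return parts[0] + ''.join(d + part for d, part in zip(digits, parts[1:]))
--         else:
--             return number
--     except Exception:
--         return number
-- ===== Notes on version B (the rewrite author's own statement) =====
-- stated objective: simpler
-- what changed: A fills the mask by looping over every digit and calling a count-limited str.replace that rescans the mask once per digit; B splits the mask at the placeholder once and zips the zero-filled digits between the pieces in a single join.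
-- outside the precondition, e.g. on format_mask('123', '___', ''): A returns '3210___', B returns '123'; on format_mask('_1', '__', '_'): A returns '1_', B returns '_1'; on format_mask('5', '0__0', '0'): A returns '5__0', B returns '0__5'
import Mathlib
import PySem

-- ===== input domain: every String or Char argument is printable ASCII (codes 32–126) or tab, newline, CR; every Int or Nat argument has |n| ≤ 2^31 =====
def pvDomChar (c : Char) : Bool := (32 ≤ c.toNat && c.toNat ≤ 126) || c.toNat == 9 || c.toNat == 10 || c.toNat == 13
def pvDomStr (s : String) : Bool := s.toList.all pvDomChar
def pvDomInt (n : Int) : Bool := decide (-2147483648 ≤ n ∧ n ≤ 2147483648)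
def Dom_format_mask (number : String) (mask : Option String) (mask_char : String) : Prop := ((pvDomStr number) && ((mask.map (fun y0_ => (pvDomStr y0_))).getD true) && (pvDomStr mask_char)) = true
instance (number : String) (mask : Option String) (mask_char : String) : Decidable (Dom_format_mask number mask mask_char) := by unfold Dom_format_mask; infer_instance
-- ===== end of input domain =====

-- B replaces A's per-digit first-occurrence `str.replace(mask_char, digit, 1)` loop (which
-- rescans the mask once per digit) by one split of the mask at the placeholder and a zip of
-- the zero-filled digits between the pieces (objective: simpler, one pass over the mask;
-- equivalence is about the return value, neither program mutates its input).

-- the module-level mask table of both programs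
def fmMasks : PySem.Dict String String :=
  PySem.Dict.ofList [("cpf", "___.___.___-__"), ("rg", "__.___.___-__"),
   ("cnpj", "__.___.___/____-__"), ("zip", "_____-___")]

-- `mask = masks.get(mask) or mask` (a looked-up value is kept only if truthy, i.e. non-empty)
def fmEffective (m : String) : String :=
  match PySem.Dict.get? fmMasks m with
  | some v => if v = "" then m else v
  | none => m

-- ===== PORT A =====
-- Python `s.replace(old, new, 1)` (count-limited replace; not in PySem) ported by hand, exact:
-- the first non-overlapping occurrence of `old` is replaced; `old = ''` inserts at the front.
def pyReplace1Go : List Char → List Char → Char → List Char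
  | [], _, _ => []
  | c :: rest, old, d =>
      if old.isPrefixOf (c :: rest) then d :: (c :: rest).drop old.length
      else c :: pyReplace1Go rest old d

def pyReplace1 (s old : List Char) (d : Char) : List Char :=
  if old.isEmpty then d :: s else pyReplace1Go s old d

-- A: `try:` never fires on String-typed inputs; `if number and mask` then the replace loop.
def format_mask (number : String) (mask : Option String) (mask_char : String) : String :=
  match mask with
  | none => number
  | some m =>
    if number = "" ∨ m = "" then number
    else
      let m1 := fmEffective m
      let size := PySem.Str.count m1 mask_char
      let num := PySem.Str.zfill number (size : Int)
      String.ofList (num.toList.foldl (fun acc d => pyReplace1 acc mask_char.toList d) m1.toList)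

-- ===== PORT B =====
-- B: split the mask at mask_char, interleave the zero-filled digits between the pieces;
-- `split?` is none exactly where Python's split('') raises (B's except returns number there).
def format_mask_alt (number : String) (mask : Option String) (mask_char : String) : String :=
  match mask with
  | none => number
  | some m =>
    if number = "" ∨ m = "" then number
    else
      let m1 := fmEffective m
      match PySem.Str.split? m1 mask_char with
      | none => number
      | some parts =>
        let ds := (PySem.Str.zfill number ((parts.length - 1 : Nat) : Int)).toList
        String.ofList ((parts.headD "").toList ++
          (ds.zip (parts.tail.map String.toList)).flatMap (fun q => q.1 :: q.2))

-- ===== PRECONDITION & SPEC =====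
-- Pre_ excludes inputs on which A still returns but where the placeholder matching is an
-- unspecified corner with two equally accidental readings: an empty mask_char (A's repeated
-- replace('') prepends the digits reversed, B's split('') path keeps the input), and a
-- mask_char that occurs among the zero-filled digit characters themselves (a character of
-- number, or the zero padding character), where A may re-match and overwrite an already
-- inserted digit while B fills each placeholder once.
def Pre_format_mask (number : String) (mask : Option String) (mask_char : String) : Prop :=
  (match mask with
   | none => true
   | some m =>
     number = "" || m = "" ||
       (mask_char != "" &&
        (!(PySem.Str.isIn mask_char (fmEffective m)) ||
         ('0' :: number.toList).all (fun c => !(mask_char.toList.contains c))))) = true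
instance (number : String) (mask : Option String) (mask_char : String) : Decidable (Pre_format_mask number mask mask_char) := by unfold Pre_format_mask; infer_instance

def pvWitness_format_mask : String × Option String × String := ("12", some "_-_", "_")

def Spec_format_mask (number : String) (mask : Option String) (mask_char : String) (out : String) : Prop := out = format_mask_alt number mask mask_char
instance (number : String) (mask : Option String) (mask_char : String) (out : String) : Decidable (Spec_format_mask number mask mask_char out) := by unfold Spec_format_mask; infer_instance

-- ===== CLAIM (what is proved, stated in full; the proofs are below) =====
def Claim_equal_format_mask : Prop := ∀ (number : String) (mask : Option String) (mask_char : String), Dom_format_mask number mask mask_char → Pre_format_mask number mask mask_char → Spec_format_mask number mask mask_char (format_mask number mask mask_char)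

-- ===== LEMMAS AND PROOFS =====

-- a clean structural mirror of PySem.Chars.splitOn.go (same fuel, no accumulators)
def srSplit (p : List Char) : Nat → List Char → List (List Char)
  | _, [] => [[]]
  | 0, l => [l]
  | fuel + 1, c :: rest =>
      if p.isPrefixOf (c :: rest) then [] :: srSplit p fuel ((c :: rest).drop p.length)
      else (srSplit p fuel rest).modifyHead (c :: ·)

theorem srSplit_ne_nil (p : List Char) (fuel : Nat) (l : List Char) : srSplit p fuel l ≠ [] := by
  match fuel, l with
  | _, [] => simp [srSplit]
  | 0, c :: rest => simp [srSplit]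
  | fuel + 1, c :: rest =>
    unfold srSplit
    split
    · simp
    · have := srSplit_ne_nil p fuel rest
      cases h : srSplit p fuel rest with
      | nil => exact absurd h this
      | cons a t => simp

theorem splitOn_go_eq (p : List Char) (fuel : Nat) (l cur : List Char) (acc : List (List Char)) :
    PySem.Chars.splitOn.go p fuel l cur acc
      = acc.reverse ++ (srSplit p fuel l).modifyHead (cur.reverse ++ ·) := by
  induction fuel generalizing l cur acc with
  | zero =>
    cases l <;> simp [PySem.Chars.splitOn.go, srSplit]
  | succ fuel ih =>
    cases l with
    | nil => simp [PySem.Chars.splitOn.go, srSplit]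
    | cons c rest =>
      rw [PySem.Chars.splitOn.go]
      unfold srSplit
      split
      · rw [ih]
        cases h : srSplit p fuel ((c :: rest).drop p.length) with
        | nil => exact absurd h (srSplit_ne_nil p fuel _)
        | cons a t => simp
      · rw [ih]
        cases h : srSplit p fuel rest with
        | nil => exact absurd h (srSplit_ne_nil p fuel rest)
        | cons a t => simp

theorem splitOn_eq_srSplit (p s : List Char) :
    PySem.Chars.splitOn s p = srSplit p (s.length + 1) s := by
  rw [PySem.Chars.splitOn, splitOn_go_eq]
  cases h : srSplit p (s.length + 1) s with
  | nil => exact absurd h (srSplit_ne_nil p _ s)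
  | cons a t => simp

theorem count_go_eq (p : List Char) (fuel : Nat) (l : List Char) (acc : Nat) :
    PySem.Chars.count.go p fuel l acc + 1 = acc + (srSplit p fuel l).length := by
  induction fuel generalizing l acc with
  | zero => cases l <;> simp [PySem.Chars.count.go, srSplit]
  | succ fuel ih =>
    cases l with
    | nil => simp [PySem.Chars.count.go, srSplit]
    | cons c rest =>
      rw [PySem.Chars.count.go]
      unfold srSplit
      split
      · rw [ih]; simp; omega
      · rw [ih]; simp

-- one unit of fuel above the length is never consumed (p nonempty: every step drops a char)
theorem srSplit_succ_of_le {p : List Char} (hp : p ≠ []) :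
    ∀ (f : Nat) (l : List Char), l.length ≤ f → srSplit p (f + 1) l = srSplit p f l := by
  intro f
  induction f with
  | zero =>
    intro l hl
    have : l = [] := List.length_eq_zero_iff.mp (Nat.le_zero.mp hl)
    subst this; rfl
  | succ f ih =>
    intro l hl
    cases l with
    | nil => rfl
    | cons c rest =>
      have hplen : 1 ≤ p.length := List.length_pos_iff.mpr hp
      rw [srSplit_cons, srSplit_cons]
      by_cases hpre : p.isPrefixOf (c :: rest) = true
      · rw [if_pos hpre, if_pos hpre,
          ih ((c :: rest).drop p.length) (by simp at hl ⊢; omega)]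
      · rw [if_neg hpre, if_neg hpre, ih rest (by simp at hl; omega)]
where
  srSplit_cons (fuel : Nat) (c : Char) (rest : List Char) :
      srSplit p (fuel + 1) (c :: rest) =
        if p.isPrefixOf (c :: rest) then [] :: srSplit p fuel ((c :: rest).drop p.length)
        else (srSplit p fuel rest).modifyHead (c :: ·) := by
    rw [srSplit]

-- A's per-step facts about the hand-ported first-occurrence replace
theorem replace1Go_of_prefix {p : List Char} {s : List Char} (d : Char)
    (h : p.isPrefixOf s = true) (hs : s ≠ []) :
    pyReplace1Go s p d = d :: s.drop p.length := by
  cases s with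
  | nil => exact absurd rfl hs
  | cons c rest => simp [pyReplace1Go, h]

theorem replace1Go_cons_of_not_prefix {p : List Char} {c : Char} {rest : List Char} (d : Char)
    (h : ¬ p.isPrefixOf (c :: rest) = true) :
    pyReplace1Go (c :: rest) p d = c :: pyReplace1Go rest p d := by
  simp [pyReplace1Go, h]

theorem not_infix_cons {p : List Char} {c : Char} {rest : List Char}
    (h : ¬ p <:+: (c :: rest)) : ¬ p.isPrefixOf (c :: rest) = true ∧ ¬ p <:+: rest := by
  constructor
  · intro hp
    exact h ((List.isPrefixOf_iff_prefix.mp hp).isInfix)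
  · intro hi
    exact h (hi.trans (List.suffix_cons c rest).isInfix)

theorem replace1Go_of_not_infix {p : List Char} (d : Char) {s : List Char}
    (h : ¬ p <:+: s) : pyReplace1Go s p d = s := by
  induction s with
  | nil => simp [pyReplace1Go]
  | cons c rest ih =>
    obtain ⟨h1, h2⟩ := not_infix_cons h
    rw [replace1Go_cons_of_not_prefix d h1, ih h2]

theorem infix_of_infix_cons_not_prefix {p : List Char} {c : Char} {rest : List Char}
    (h : p <:+: (c :: rest)) (hnp : ¬ p.isPrefixOf (c :: rest) = true) : p <:+: rest := by
  obtain ⟨pre, suf, hps⟩ := h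
  cases pre with
  | nil => exact absurd (List.isPrefixOf_iff_prefix.mpr ⟨suf, by simpa using hps⟩) hnp
  | cons a t =>
    refine ⟨t, suf, ?_⟩
    have := congrArg List.tail hps
    simpa using this

-- a matched replace splits the string around one occurrence of p
theorem replace1Go_decomp {p : List Char} (d : Char) {s : List Char}
    (hp : p ≠ []) (h : p <:+: s) :
    ∃ pre suf, s = pre ++ p ++ suf ∧ pyReplace1Go s p d = pre ++ d :: suf := by
  induction s with
  | nil =>
    exact absurd (List.eq_nil_of_infix_nil h) hp
  | cons c rest ih =>
    by_cases hpre : p.isPrefixOf (c :: rest) = true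
    · obtain ⟨suf, hsuf⟩ := List.isPrefixOf_iff_prefix.mp hpre
      refine ⟨[], suf, by simpa using hsuf.symm, ?_⟩
      rw [replace1Go_of_prefix d hpre (by simp)]
      simp [← hsuf]
    · obtain ⟨pre, suf, hs, hr⟩ := ih (infix_of_infix_cons_not_prefix h hpre)
      exact ⟨c :: pre, suf, by simp [hs], by rw [replace1Go_cons_of_not_prefix d hpre, hr]; simp⟩

-- "no match at the head" survives a replace whose inserted char is not a char of p
theorem not_prefix_replace1Go {p : List Char} {m : List Char} {d : Char}
    (hp : p ≠ []) (hm : ¬ p.isPrefixOf m = true) (hd : d ∉ p) :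
    ¬ p.isPrefixOf (pyReplace1Go m p d) = true := by
  by_cases hi : p <:+: m
  · obtain ⟨pre, suf, hs, hr⟩ := replace1Go_decomp d hp hi
    rw [hr]
    intro hpref
    have hpref' := List.isPrefixOf_iff_prefix.mp hpref
    by_cases hlen : p.length ≤ pre.length
    · have hppre : p <+: pre :=
        List.prefix_of_prefix_length_le hpref' (List.prefix_append pre (d :: suf)) hlen
      have hpm : p <+: m := by
        rw [hs, List.append_assoc]
        exact hppre.trans (List.prefix_append pre (p ++ suf))
      exact hm (List.isPrefixOf_iff_prefix.mpr hpm)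
    · rw [Nat.not_le] at hlen
      have hd' : p[pre.length]'hlen = d := by
        rw [hpref'.getElem hlen]
        simp
      exact hd (hd' ▸ List.getElem_mem hlen)
  · rw [replace1Go_of_not_infix d hi]; exact hm

-- the digit-replacement fold (A's loop, over a fixed separator p)
def foldR (p : List Char) (s : List Char) (ds : List Char) : List Char :=
  ds.foldl (fun acc d => pyReplace1Go acc p d) s

theorem foldR_of_not_infix {p : List Char} {s : List Char}
    (h : ¬ p <:+: s) (ds : List Char) : foldR p s ds = s := by
  induction ds with
  | nil => rfl
  | cons d ds ih =>
    show foldR p (pyReplace1Go s p d) ds = s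
    rw [replace1Go_of_not_infix d h, ih]

theorem not_prefix_cons_of_not_mem {p : List Char} (hp : p ≠ []) {d : Char} (hd : d ∉ p)
    (t : List Char) : ¬ p.isPrefixOf (d :: t) = true := by
  intro h
  have h' := List.isPrefixOf_iff_prefix.mp h
  cases p with
  | nil => exact hp rfl
  | cons a q =>
    have : a = d := by
      have := h'.getElem (i := 0) (by simp)
      simpa using this
    exact hd (by simp [this])

theorem foldR_cons_of_not_prefix {p : List Char} (hp : p ≠ []) {c : Char} {rest : List Char}
    (h : ¬ p.isPrefixOf (c :: rest) = true) (ds : List Char) (hd : ∀ d ∈ ds, d ∉ p) :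
    foldR p (c :: rest) ds = c :: foldR p rest ds := by
  induction ds generalizing rest with
  | nil => rfl
  | cons d ds ih =>
    show foldR p (pyReplace1Go (c :: rest) p d) ds = c :: foldR p (pyReplace1Go rest p d) ds
    rw [replace1Go_cons_of_not_prefix d h]
    have hnp := not_prefix_replace1Go hp h (hd d (by simp))
    rw [replace1Go_cons_of_not_prefix d h] at hnp
    exact ih hnp (fun e he => hd e (by simp [he]))

-- B's interleaving of digits between the split pieces
def interleave (parts : List (List Char)) (ds : List Char) : List Char :=
  parts.headD [] ++ (ds.zip parts.tail).flatMap (fun q => q.1 :: q.2)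

theorem srSplit_of_not_infix {p : List Char} :
    ∀ (fuel : Nat) {s : List Char}, ¬ p <:+: s → srSplit p fuel s = [s] := by
  intro fuel
  induction fuel with
  | zero => intro s _; cases s <;> rfl
  | succ f ih =>
    intro s h
    cases s with
    | nil => rfl
    | cons c rest =>
      obtain ⟨h1, h2⟩ := not_infix_cons h
      unfold srSplit
      rw [if_neg h1, ih h2]
      rfl

theorem interleave_singleton (s : List Char) (ds : List Char) : interleave [s] ds = s := by
  simp [interleave]

theorem interleave_nil_cons {parts : List (List Char)} (hne : parts ≠ []) (d : Char)
    (ds : List Char) : interleave ([] :: parts) (d :: ds) = d :: interleave parts ds := by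
  cases parts with
  | nil => exact absurd rfl hne
  | cons q t => simp [interleave]

theorem interleave_modifyHead {parts : List (List Char)} (hne : parts ≠ []) (c : Char)
    (ds : List Char) : interleave (parts.modifyHead (c :: ·)) ds = c :: interleave parts ds := by
  cases parts with
  | nil => exact absurd rfl hne
  | cons q t => simp [interleave]

-- the core equivalence: A's replace loop equals B's split-and-interleave
theorem foldR_eq_interleave {p : List Char} (hp : p ≠ []) :
    ∀ (fuel : Nat) (s ds : List Char), s.length < fuel → (∀ d ∈ ds, d ∉ p) →
      (srSplit p fuel s).length ≤ ds.length + 1 →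
      foldR p s ds = interleave (srSplit p fuel s) ds := by
  intro fuel
  induction fuel with
  | zero => intro s ds h; omega
  | succ f ih =>
    intro s ds hlen hd hcnt
    by_cases hi : p <:+: s
    · cases s with
      | nil => exact absurd (List.eq_nil_of_infix_nil hi) hp
      | cons c rest =>
        by_cases hpre : p.isPrefixOf (c :: rest) = true
        · -- a match at the head: one digit is consumed
          have hsr : srSplit p (f + 1) (c :: rest)
              = [] :: srSplit p f ((c :: rest).drop p.length) := by
            rw [srSplit, if_pos hpre]
          rw [hsr] at hcnt ⊢
          have hne := srSplit_ne_nil p f ((c :: rest).drop p.length)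
          cases ds with
          | nil =>
            exfalso
            have hpos := List.length_pos_iff.mpr hne
            simp only [List.length_cons, List.length_nil] at hcnt
            omega
          | cons d ds' =>
            have hdp : d ∉ p := hd d (by simp)
            show foldR p (pyReplace1Go (c :: rest) p d) ds' = _
            rw [replace1Go_of_prefix d hpre (by simp)]
            rw [foldR_cons_of_not_prefix hp (not_prefix_cons_of_not_mem hp hdp _) ds'
                (fun e he => hd e (by simp [he]))]
            rw [interleave_nil_cons hne d ds']
            congr 1
            apply ih
            · have : p.length ≥ 1 := List.length_pos_iff.mpr hp
              simp at hlen ⊢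
              omega
            · exact fun e he => hd e (by simp [he])
            · simp at hcnt ⊢; omega
        · -- no match at the head: the head character passes through unchanged
          have hsr : srSplit p (f + 1) (c :: rest)
              = (srSplit p f rest).modifyHead (c :: ·) := by
            rw [srSplit, if_neg hpre]
          rw [hsr] at hcnt ⊢
          have hne := srSplit_ne_nil p f rest
          rw [foldR_cons_of_not_prefix hp hpre ds hd]
          rw [interleave_modifyHead hne c ds]
          congr 1
          apply ih
          · simp at hlen ⊢; omega
          · exact hd
          · simpa using hcnt
    · rw [foldR_of_not_infix hi ds, srSplit_of_not_infix _ hi, interleave_singleton]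

-- every char of a zero-filled string is a char of the string or '0'
theorem mem_zfill {c : Char} {cs : List Char} {w : Int}
    (h : c ∈ PySem.Chars.zfill cs w) : c ∈ cs ∨ c = '0' := by
  unfold PySem.Chars.zfill at h
  split at h
  · exact Or.inl h
  · split at h
    · rename_i c0 rest _
      split at h
      · simp at h
        rcases h with h | h | h
        · exact Or.inl (by simp [h])
        · exact Or.inr h.2
        · exact Or.inl (by simp [h])
      · simp at h
        rcases h with h | h
        · exact Or.inr h.2
        · exact Or.inl (by simp [h])
    · simp at h
      exact Or.inr h.2

-- the branch bodies of the two ports agree under Pre_'s conditions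
theorem core_eq (number m1 mask_char : String)
    (hmc : mask_char ≠ "")
    (hdis : PySem.Str.isIn mask_char m1 = true →
      ∀ c ∈ '0' :: number.toList, c ∉ mask_char.toList) :
    String.ofList ((PySem.Str.zfill number ((PySem.Str.count m1 mask_char : Nat) : Int)).toList.foldl
        (fun acc d => pyReplace1 acc mask_char.toList d) m1.toList)
      = (match PySem.Str.split? m1 mask_char with
         | none => number
         | some parts =>
           String.ofList ((parts.headD "").toList ++
             (((PySem.Str.zfill number ((parts.length - 1 : Nat) : Int)).toList).zip
               (parts.tail.map String.toList)).flatMap (fun q => q.1 :: q.2))) := by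
  have hpne : mask_char.toList ≠ [] := by
    intro h
    exact hmc (by simpa using congrArg String.ofList h)
  -- A's loop is foldR (pyReplace1 never takes the empty-pattern branch)
  have hfold : ∀ (ds s : List Char),
      ds.foldl (fun acc d => pyReplace1 acc mask_char.toList d) s
        = foldR mask_char.toList s ds := by
    intro ds s
    unfold foldR
    congr 1
    funext acc d
    simp [pyReplace1, List.isEmpty_iff, hpne]
  -- B's split succeeds and is srSplit with the canonical fuel
  have hsp : PySem.Str.split? m1 mask_char
      = some ((PySem.Chars.splitOn m1.toList mask_char.toList).map String.ofList) := by
    simp [PySem.Str.split?, PySem.Chars.split?, List.isEmpty_iff, hpne]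
  rw [hsp]
  dsimp only
  set p := mask_char.toList with hpdef
  set L := PySem.Chars.splitOn m1.toList p with hLdef
  have hLsr : L = srSplit p (m1.toList.length + 1) m1.toList := splitOn_eq_srSplit p m1.toList
  have hLne : L ≠ [] := by rw [hLsr]; exact srSplit_ne_nil p _ _
  -- the piece count is the placeholder count plus one
  have hcc : PySem.Str.count m1 mask_char
      = PySem.Chars.count.go p m1.toList.length m1.toList 0 := by
    rw [PySem.Str.count, PySem.Chars.count,
      if_neg (by simp [List.isEmpty_iff, hpne] : ¬ (p.isEmpty = true))]
  have hc1 : L.length = PySem.Str.count m1 mask_char + 1 := by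
    rw [hLsr, srSplit_succ_of_le hpne _ _ (le_refl _), hcc]
    have := count_go_eq p m1.toList.length m1.toList 0
    omega
  -- hence both programs zero-fill to the same width
  have hwidth : ((L.map String.ofList).length - 1 : Nat) = PySem.Str.count m1 mask_char := by
    simp [hc1]
  rw [hwidth]
  set ds := (PySem.Str.zfill number ((PySem.Str.count m1 mask_char : Nat) : Int)).toList with hds
  -- B's expression is interleave L ds
  obtain ⟨q, t, hqt⟩ : ∃ q t, L = q :: t := by
    cases hL : L with
    | nil => exact absurd hL hLne
    | cons q t => exact ⟨q, t, rfl⟩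
  have hB : ((L.map String.ofList).headD "").toList ++
      (ds.zip ((L.map String.ofList).tail.map String.toList)).flatMap (fun q => q.1 :: q.2)
        = interleave L ds := by
    rw [hqt]
    simp [interleave, Function.comp_def]
  rw [hfold, hB]
  congr 1
  -- remaining: foldR = interleave
  by_cases hin : p <:+: m1.toList
  · have hisin : PySem.Str.isIn mask_char m1 = true := by
      rw [PySem.Str.isIn_eq]
      exact (PySem.Chars.isIn_iff_infix _ _).mpr hin
    have hdig : ∀ d ∈ ds, d ∉ p := by
      intro d hdm
      rw [hds] at hdm
      rw [PySem.Str.zfill] at hdm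
      simp only [String.toList_ofList] at hdm
      rcases mem_zfill hdm with h | h
      · exact hdis hisin d (by simp [h])
      · exact hdis hisin d (by simp [h])
    have hlds : L.length ≤ ds.length + 1 := by
      rw [hc1, hds]
      have : (PySem.Str.zfill number ((PySem.Str.count m1 mask_char : Nat) : Int)).toList.length
          = max number.toList.length (PySem.Str.count m1 mask_char) := by
        rw [PySem.Str.zfill]
        simp [PySem.Chars.length_zfill]
      omega
    rw [hLsr]
    exact foldR_eq_interleave hpne _ m1.toList ds (by omega) hdig (by rw [← hLsr]; exact hlds)
  · rw [foldR_of_not_infix hin ds, hLsr, srSplit_of_not_infix _ hin, interleave_singleton]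

-- ===== VERDICT (by name: the statement is the Claim_ definition above) =====
theorem format_mask_spec : Claim_equal_format_mask := by
  intro number mask mask_char _ hpre
  unfold Spec_format_mask
  cases mask with
  | none => rfl
  | some m =>
    unfold Pre_format_mask at hpre
    unfold format_mask format_mask_alt
    dsimp only
    by_cases hb : number = "" ∨ m = ""
    · rw [if_pos hb, if_pos hb]
    · rw [if_neg hb, if_neg hb]
      obtain ⟨hn, hm⟩ := not_or.mp hb
      simp only [hn, hm, Bool.or_eq_true, decide_eq_true_eq, false_or, bne_iff_ne, ne_eq,
        Bool.and_eq_true, Bool.not_eq_true', List.all_eq_true, List.contains_eq_mem, decide_eq_false_iff_not] at hpre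
      obtain ⟨hmc, hdis⟩ := hpre
      refine core_eq number (fmEffective m) mask_char hmc ?_
      intro hisin c hc
      rcases hdis with h | h
      · rw [hisin] at h; cases h
      · exact h c hc
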